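-- pv_equiv track=rewrite | github.com/branchev/SoftUni | python_advanced/tuples_and_sets/5_lab_softuni_party.py | guests_filtration
-- ===== SOURCE A (Python) =====
-- def guests_filtration(guests):
--     vip_guests = []
--     regular_guests = []
--     for guest in guests:
--         if guest[0].isdigit():
--             vip_guests.append(guest)
--         else:
--             regular_guests.append(guest)
--     vip_guests = sorted(vip_guests)
--     regular_guests = sorted(regular_guests)
--     return vip_guests + regular_guests
-- ===== SOURCE B (Python) =====
-- def guests_filtration(guests):
--     return sorted(guests, key=lambda g: (not g[0].isdigit(), g))
-- ===== Notes on version B (the rewrite author's own statement) =====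
-- stated objective: simpler
-- what changed: Replaces the explicit partition loop and two separate sorts with a single stable sort over the whole input using the composite key (not g[0].isdigit(), g).
import Mathlib
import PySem

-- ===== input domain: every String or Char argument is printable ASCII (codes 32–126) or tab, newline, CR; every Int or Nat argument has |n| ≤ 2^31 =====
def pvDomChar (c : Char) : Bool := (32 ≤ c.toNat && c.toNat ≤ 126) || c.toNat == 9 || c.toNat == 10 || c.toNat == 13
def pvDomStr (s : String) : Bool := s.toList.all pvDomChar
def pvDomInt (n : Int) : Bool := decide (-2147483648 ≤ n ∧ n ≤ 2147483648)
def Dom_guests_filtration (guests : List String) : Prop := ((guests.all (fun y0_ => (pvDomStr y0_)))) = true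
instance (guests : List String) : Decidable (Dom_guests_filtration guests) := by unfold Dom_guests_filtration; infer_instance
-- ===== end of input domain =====

-- B replaces A's partition-loop-plus-two-sorts with one stable sort on the composite key
-- (not guest[0].isdigit(), guest); objective: simpler.

-- ===== PORT A =====
-- guest[0].isdigit() (both Pythons evaluate this; IndexError on "" is excluded by Pre_)
def pvFirstDigit (g : String) : Bool :=
  match PySem.Str.pyGet? g 0 with
  | some c => PySem.Chars.isdigit c
  | none => false

def guests_filtration (guests : List String) : List String :=
  let st := guests.foldl
    (fun (acc : List String × List String) guest =>
      if pvFirstDigit guest then (acc.1 ++ [guest], acc.2) else (acc.1, acc.2 ++ [guest]))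
    ([], [])
  PySem.List.sorted st.1 (fun x => x) false ++ PySem.List.sorted st.2 (fun x => x) false

-- ===== PORT B =====
def guests_filtration_alt (guests : List String) : List String :=
  PySem.List.sorted2 guests (fun g => !pvFirstDigit g) (fun g => g) false

-- ===== PRECONDITION & SPEC =====
-- Pre_ excludes lists containing the empty string, on which both Pythons raise IndexError (guest[0]).
def Pre_guests_filtration (guests : List String) : Prop := ∀ g ∈ guests, g ≠ ""
instance (guests : List String) : Decidable (Pre_guests_filtration guests) := by
  unfold Pre_guests_filtration; infer_instance
def pvWitness_guests_filtration : List String := ["7heVIP", "alice", "3x", "Bob"]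

def Spec_guests_filtration (guests : List String) (out : List String) : Prop := out = guests_filtration_alt guests
instance (guests : List String) (out : List String) : Decidable (Spec_guests_filtration guests out) := by unfold Spec_guests_filtration; infer_instance

-- ===== CLAIM (what is proved, stated in full; the proofs are below) =====
def Claim_equal_guests_filtration : Prop := ∀ (guests : List String), Dom_guests_filtration guests → Pre_guests_filtration guests → Spec_guests_filtration guests (guests_filtration guests)

-- ===== LEMMAS AND PROOFS =====

-- insertBy only looks at `before x ·` on members of the list
theorem pv_insertBy_congr {α : Type} (b1 b2 : α → α → Bool) (x : α) (ys : List α)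
    (h : ∀ y ∈ ys, b1 x y = b2 x y) :
    PySem.List.insertBy b1 x ys = PySem.List.insertBy b2 x ys := by
  induction ys with
  | nil => rfl
  | cons y ys ih =>
    simp only [PySem.List.insertBy, h y (by simp)]
    split
    · rfl
    · simp only [List.cons.injEq, true_and]
      exact ih (fun z hz => h z (by simp [hz]))

-- x goes before every element of R: insertion lands inside V (or at its end)
theorem pv_insertBy_append_left {α : Type} (before : α → α → Bool) (x : α) (V R : List α)
    (hR : ∀ r ∈ R, before x r = true) :
    PySem.List.insertBy before x (V ++ R) = PySem.List.insertBy before x V ++ R := by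
  induction V with
  | nil =>
    cases R with
    | nil => rfl
    | cons r rs => simp [PySem.List.insertBy, hR r (by simp)]
  | cons v V ih =>
    simp only [List.cons_append, PySem.List.insertBy]
    split
    · rfl
    · simp only [List.cons_append, List.cons.injEq, true_and]
      exact ih

-- x goes after every element of V: insertion lands inside R
theorem pv_insertBy_append_right {α : Type} (before : α → α → Bool) (x : α) (V R : List α)
    (hV : ∀ v ∈ V, before x v = false) :
    PySem.List.insertBy before x (V ++ R) = V ++ PySem.List.insertBy before x R := by
  induction V with
  | nil => rfl
  | cons v V ih =>
    simp only [List.cons_append, PySem.List.insertBy, hV v (by simp)]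
    simp only [Bool.false_eq_true, if_false, List.cons.injEq, true_and]
    exact ih (fun w hw => hV w (by simp [hw]))

-- the single composite-key stable sort equals sorted(vip) ++ sorted(regular)
theorem pv_sorted2_split (xs : List String) :
    PySem.List.sorted2 xs (fun g => !pvFirstDigit g) (fun g => g) false =
      PySem.List.sorted (xs.filter pvFirstDigit) (fun x => x) false ++
      PySem.List.sorted (xs.filter (fun g => !pvFirstDigit g)) (fun x => x) false := by
  induction xs using List.reverseRecOn with
  | nil => rfl
  | append_singleton xs x ih =>
    have hlt2 : PySem.List.sorted2 (xs ++ [x]) (fun g => !pvFirstDigit g) (fun g => g) false =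
        PySem.List.insertBy
          (fun a b => decide ((!pvFirstDigit a) < (!pvFirstDigit b)) ||
            (!decide ((!pvFirstDigit b) < (!pvFirstDigit a)) && decide (a < b)))
          x (PySem.List.sorted2 xs (fun g => !pvFirstDigit g) (fun g => g) false) := by
      simp [PySem.List.sorted2, List.foldl_append]
    have hsortapp : ∀ ys : List String,
        PySem.List.sorted (ys ++ [x]) (fun g : String => g) false =
          PySem.List.insertBy (fun a b => decide (a < b)) x
            (PySem.List.sorted ys (fun g : String => g) false) := by
      intro ys
      rw [PySem.List.sorted_eq_foldl_insertBy, PySem.List.sorted_eq_foldl_insertBy,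
        List.foldl_append]
      rfl
    have hVmem : ∀ v ∈ PySem.List.sorted (xs.filter pvFirstDigit) (fun g : String => g) false,
        pvFirstDigit v = true := by
      intro v hv
      rw [PySem.List.mem_sorted] at hv
      exact (List.mem_filter.mp hv).2
    have hRmem : ∀ r ∈ PySem.List.sorted (xs.filter (fun g => !pvFirstDigit g)) (fun g : String => g) false,
        pvFirstDigit r = false := by
      intro r hr
      rw [PySem.List.mem_sorted] at hr
      simpa using (List.mem_filter.mp hr).2
    rw [hlt2, ih]
    cases hx : pvFirstDigit x with
    | true =>
      rw [pv_insertBy_append_left _ _ _ _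
          (fun r hr => by simp [hx, hRmem r hr]),
        pv_insertBy_congr _ (fun a b => decide (a < b)) x _
          (fun v hv => by simp [hx, hVmem v hv]),
        ← hsortapp]
      simp [List.filter_append, hx]
    | false =>
      rw [pv_insertBy_append_right _ _ _ _
          (fun v hv => by simp [hx, hVmem v hv]),
        pv_insertBy_congr _ (fun a b => decide (a < b)) x _
          (fun r hr => by simp [hx, hRmem r hr]),
        ← hsortapp]
      simp [List.filter_append, hx]

-- A's partition loop computes the two filters
theorem pv_partition_eq (xs : List String) :
    xs.foldl
      (fun (acc : List String × List String) guest =>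
        if pvFirstDigit guest then (acc.1 ++ [guest], acc.2) else (acc.1, acc.2 ++ [guest]))
      ([], []) =
    (xs.filter pvFirstDigit, xs.filter (fun g => !pvFirstDigit g)) := by
  have hfun : (fun (acc : List String × List String) guest =>
      if pvFirstDigit guest then (acc.1 ++ [guest], acc.2) else (acc.1, acc.2 ++ [guest])) =
      (fun (acc : List String × List String) guest =>
        ((if pvFirstDigit guest then acc.1 ++ [guest] else acc.1),
         (if !pvFirstDigit guest then acc.2 ++ [guest] else acc.2))) := by
    funext acc g
    cases pvFirstDigit g <;> simp
  rw [hfun, PySem.List.foldl_prod_mk (fun (v : List String) g => if pvFirstDigit g then v ++ [g] else v) (fun (r : List String) g => if (!pvFirstDigit g) then r ++ [g] else r) xs [] []]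
  have h1 := PySem.List.foldl_append_if pvFirstDigit (fun g => g) xs ([] : List String)
  have h2 := PySem.List.foldl_append_if (fun g => !pvFirstDigit g) (fun g => g) xs ([] : List String)
  simp only [List.map_id_fun', id, Bool.not_eq_true'] at h1 h2
  simp [h1, h2]

-- ===== VERDICT (by name: the statement is the Claim_ definition above) =====
theorem guests_filtration_spec : Claim_equal_guests_filtration := by
  intro guests _ _
  unfold Spec_guests_filtration guests_filtration guests_filtration_alt
  rw [pv_partition_eq, pv_sorted2_split]
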